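-- pv_equiv track=rewrite | github.com/eastzone/atpg | atpg/headerspace/hs.py | byte_array_wildcard_to_mask_match_strings
-- ===== SOURCE A (Python) =====
-- def byte_array_wildcard_to_mask_match_strings(byte_array):
--     if byte_array == None:
--         return "None"
--     str_mask = ""
--     str_match = ""
--     for b in byte_array:
--         for i in range(4):
--             b_shift = b >> (i * 2)
--             next_bit = b_shift & 0x03
--             if (next_bit == 0x01):
--                 str_mask = "1" + str_mask
--                 str_match = "0" + str_match
--             elif (next_bit == 0x02):
--                 str_mask = "1" + str_mask
--                 str_match = "1" + str_match
--             elif (next_bit == 0x03):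
--                 str_mask = "0" + str_mask
--                 str_match = "0" + str_match
--             else:
--                 str_mask = "0" + str_mask
--                 str_match = "1" + str_match
--     return [str_mask,str_match]
-- ===== SOURCE B (Python) =====
-- _PAIR = {'00': ('0', '1'), '01': ('1', '0'), '10': ('1', '1'), '11': ('0', '0')}
--
-- def byte_array_wildcard_to_mask_match_strings(byte_array):
--     if byte_array is None:
--         return "None"
--     bits = ''.join(format(b & 0xFF, '08b') for b in reversed(byte_array))
--     it = iter(bits)
--     cols = [_PAIR[hi + lo] for hi, lo in zip(it, it)]
--     return [''.join(m for m, _ in cols), ''.join(t for _, t in cols)]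
-- ===== Notes on version B (the rewrite author's own statement) =====
-- stated objective: simpler
-- what changed: Replaces A's bit-shift branch cascade with per-character string prepends by a staged text pipeline: render each byte's low 8 bits as an 8-char binary string via format() in reversed byte order, chunk the resulting bit string into 2-char pairs, translate each pair through a fixed 4-entry dict to a (mask, match) column, and join the two columns.
-- outside the precondition, e.g. on byte_array_wildcard_to_mask_match_strings(None): A returns 'None', B returns 'None'
import Mathlib
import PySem

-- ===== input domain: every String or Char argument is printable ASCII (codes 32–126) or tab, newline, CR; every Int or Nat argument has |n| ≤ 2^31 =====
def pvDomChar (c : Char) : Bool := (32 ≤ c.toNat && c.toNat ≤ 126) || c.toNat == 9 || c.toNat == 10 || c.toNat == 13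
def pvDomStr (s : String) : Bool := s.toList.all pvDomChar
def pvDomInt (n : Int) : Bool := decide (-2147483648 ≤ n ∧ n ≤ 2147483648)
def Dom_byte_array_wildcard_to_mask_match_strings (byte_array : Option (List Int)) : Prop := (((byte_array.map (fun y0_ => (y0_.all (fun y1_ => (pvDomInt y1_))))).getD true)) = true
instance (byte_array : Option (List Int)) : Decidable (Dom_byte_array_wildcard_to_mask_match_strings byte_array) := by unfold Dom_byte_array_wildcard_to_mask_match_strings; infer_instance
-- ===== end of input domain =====

-- B replaces A's per-2-bit branch cascade with per-character string prepends by a staged text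
-- pipeline: render each byte (low 8 bits) as an 8-char binary string in reversed byte order,
-- chunk the bit string into pairs, map each pair through a fixed 4-entry dict to a
-- (mask char, match char) column, and join the two columns (objective: simpler).

-- ===== PORT A =====
-- inner body of 'for i in range(4)': i comes from pyRange 0 4 1, so 0 ≤ i and (i*2).toNat is
-- exactly Python's shift amount b >> (i*2); string prepends are kept as List Char conses
-- (String.ofList at the end), which is exact for Python's "c" + s.
def pvStepA (b : Int) (st : List Char × List Char) (i : Int) : List Char × List Char :=
  let b_shift := b >>> (i * 2).toNat
  let next_bit := PySem.Int.band b_shift 3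
  if next_bit = 1 then ('1' :: st.1, '0' :: st.2)
  else if next_bit = 2 then ('1' :: st.1, '1' :: st.2)
  else if next_bit = 3 then ('0' :: st.1, '0' :: st.2)
  else ('0' :: st.1, '1' :: st.2)

-- Python returns the bare string "None" (not a list of strings) for byte_array == None; that
-- input is excluded by Pre_ below and the port returns [] there.
def byte_array_wildcard_to_mask_match_strings (byte_array : Option (List Int)) : List String :=
  match byte_array with
  | none => []
  | some l =>
    let st := l.foldl (fun st b => (PySem.List.pyRange 0 4 1).foldl (pvStepA b) st) ([], [])
    [String.ofList st.1, String.ofList st.2]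

-- ===== PORT B =====
-- the module constant _PAIR; its 1-char string values are ported as Char (''.join of such
-- values at the end becomes String.ofList), exact for these ASCII characters
def pvPAIR : PySem.Dict String (Char × Char) :=
  PySem.Dict.ofList [("00", ('0', '1')), ("01", ('1', '0')), ("10", ('1', '1')), ("11", ('0', '0'))]

-- format(n, '08b') for 0 ≤ n < 256: the 8 binary digits of n, most significant first (exact
-- on that range, and B only applies it to b & 0xFF)
def pvBin8 (n : Int) : List Char :=
  ([7, 6, 5, 4, 3, 2, 1, 0] : List Nat).map (fun k => if (n >>> k) % 2 = 1 then '1' else '0')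

-- [_PAIR[hi+lo] for hi,lo in zip(it,it)] with it = iter(bits): consume bits two at a time,
-- dropping a trailing odd char (zip stops; never happens: len(bits) is a multiple of 8).
-- _PAIR[...] raises KeyError on a missing key; the getD default is unreachable since every
-- chunk consists of '0'/'1' characters.
def pvColsB : List Char → List (Char × Char)
  | hi :: lo :: rest => ((PySem.Dict.get? pvPAIR (String.ofList [hi, lo])).getD ('?', '?')) :: pvColsB rest
  | _ => []

def byte_array_wildcard_to_mask_match_strings_alt (byte_array : Option (List Int)) : List String :=
  match byte_array with
  | none => []  -- Python B returns the bare string "None" here; excluded by Pre_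
  | some l =>
    let bits := (l.reverse.map (fun b => pvBin8 (PySem.Int.band b 255))).flatten
    let cols := pvColsB bits
    [String.ofList (cols.map Prod.fst), String.ofList (cols.map Prod.snd)]

-- ===== PRECONDITION & SPEC =====
-- Pre_ excludes only byte_array = None, where A (and B) return the bare string "None",
-- which is not a value of the declared return type List String.
def Pre_byte_array_wildcard_to_mask_match_strings (byte_array : Option (List Int)) : Prop :=
  byte_array ≠ none
instance (byte_array : Option (List Int)) : Decidable (Pre_byte_array_wildcard_to_mask_match_strings byte_array) := by unfold Pre_byte_array_wildcard_to_mask_match_strings; infer_instance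

def pvWitness_byte_array_wildcard_to_mask_match_strings : Option (List Int) := some [1, 170, -5]

def Spec_byte_array_wildcard_to_mask_match_strings (byte_array : Option (List Int)) (out : List String) : Prop := out = byte_array_wildcard_to_mask_match_strings_alt byte_array
instance (byte_array : Option (List Int)) (out : List String) : Decidable (Spec_byte_array_wildcard_to_mask_match_strings byte_array out) := by unfold Spec_byte_array_wildcard_to_mask_match_strings; infer_instance

-- ===== CLAIM (what is proved, stated in full; the proofs are below) =====
def Claim_equal_byte_array_wildcard_to_mask_match_strings : Prop := ∀ (byte_array : Option (List Int)), Dom_byte_array_wildcard_to_mask_match_strings byte_array → Pre_byte_array_wildcard_to_mask_match_strings byte_array → Spec_byte_array_wildcard_to_mask_match_strings byte_array (byte_array_wildcard_to_mask_match_strings byte_array)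

-- ===== LEMMAS AND PROOFS =====

-- A's branch cascade, per component.
def pvMaskChar (g : Int) : Char := if g = 1 then '1' else if g = 2 then '1' else if g = 3 then '0' else '0'
def pvMatchChar (g : Int) : Char := if g = 1 then '0' else if g = 2 then '1' else if g = 3 then '0' else '1'

-- the four (mask, match) columns A produces for byte b, leftmost group first
def pvPairsA (b : Int) : List (Char × Char) :=
  [(pvMaskChar (PySem.Int.band (b >>> (6:Nat)) 3), pvMatchChar (PySem.Int.band (b >>> (6:Nat)) 3)),
   (pvMaskChar (PySem.Int.band (b >>> (4:Nat)) 3), pvMatchChar (PySem.Int.band (b >>> (4:Nat)) 3)),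
   (pvMaskChar (PySem.Int.band (b >>> (2:Nat)) 3), pvMatchChar (PySem.Int.band (b >>> (2:Nat)) 3)),
   (pvMaskChar (PySem.Int.band (b >>> (0:Nat)) 3), pvMatchChar (PySem.Int.band (b >>> (0:Nat)) 3))]

theorem pvStepA_eq (b : Int) (st : List Char × List Char) (i : Int) :
    pvStepA b st i = (pvMaskChar (PySem.Int.band (b >>> (i * 2).toNat) 3) :: st.1,
                      pvMatchChar (PySem.Int.band (b >>> (i * 2).toNat) 3) :: st.2) := by
  simp only [pvStepA, pvMaskChar, pvMatchChar]
  split_ifs <;> rfl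

theorem pv_nat_and255 (c : Nat) : c &&& 255 = c % 256 := by
  have h := Nat.and_two_pow_sub_one_eq_mod c 8
  norm_num at h; exact h

theorem pv_nat_and3 (c : Nat) : c &&& 3 = c % 4 := by
  have h := Nat.and_two_pow_sub_one_eq_mod c 2
  norm_num at h; exact h

theorem pv_band255 (b : Int) : PySem.Int.band b 255 = b % 256 := by
  have h255 : (255 : Int).toNat = 255 := rfl
  unfold PySem.Int.band
  split_ifs with h h2 h3
  · rw [h255, pv_nat_and255]; omega
  · omega
  · rw [h255, Nat.and_comm 255 (-b - 1).toNat, pv_nat_and255]; omega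
  · omega

theorem pv_band3 (b : Int) : PySem.Int.band b 3 = b % 4 := by
  have h3' : (3 : Int).toNat = 3 := rfl
  unfold PySem.Int.band
  split_ifs with h h2 h3
  · rw [h3', pv_nat_and3]; omega
  · omega
  · rw [h3', Nat.and_comm 3 (-b - 1).toNat, pv_nat_and3]; omega
  · omega

-- the 2-bit group at offset k of b depends only on b's low byte (k ≤ 6)
theorem pv_group_low (b : Int) (k : Nat) (hk : k = 0 ∨ k = 2 ∨ k = 4 ∨ k = 6) :
    PySem.Int.band ((PySem.Int.band b 255) >>> k) 3 = PySem.Int.band (b >>> k) 3 := by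
  rw [Int.shiftRight_eq_div_pow, Int.shiftRight_eq_div_pow, pv_band3, pv_band3, pv_band255]
  rcases hk with h | h | h | h <;> subst h <;> norm_num <;> omega

-- B's whole per-byte pipeline (binary rendering, chunking, dict lookup) against A's branch
-- table, by kernel evaluation over all 256 byte values
set_option maxRecDepth 8192 in
theorem pv_col_table : ∀ v : Fin 256, pvColsB (pvBin8 ((v.val : Int))) = pvPairsA ((v.val : Int)) := by
  decide

theorem pv_cols_byte (b : Int) : pvColsB (pvBin8 (PySem.Int.band b 255)) = pvPairsA b := by
  have hb : 0 ≤ PySem.Int.band b 255 ∧ PySem.Int.band b 255 < 256 := by rw [pv_band255]; omega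
  have hle : (PySem.Int.band b 255).toNat < 256 := by omega
  have ht := pv_col_table ⟨(PySem.Int.band b 255).toNat, hle⟩
  have hcast : (((PySem.Int.band b 255).toNat : Nat) : Int) = PySem.Int.band b 255 := by omega
  rw [hcast] at ht
  rw [ht]
  unfold pvPairsA
  rw [pv_group_low b 0 (by omega), pv_group_low b 2 (by omega),
      pv_group_low b 4 (by omega), pv_group_low b 6 (by omega)]

-- pvBin8 always yields 8 characters, so pvColsB distributes over its concatenations
theorem pv_cols_append (n : Int) (rest : List Char) :
    pvColsB (pvBin8 n ++ rest) = pvColsB (pvBin8 n) ++ pvColsB rest := by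
  simp [pvBin8, pvColsB]

theorem pv_cols_flatten (m : List Int) :
    pvColsB ((m.map (fun b => pvBin8 (PySem.Int.band b 255))).flatten) = (m.map pvPairsA).flatten := by
  induction m with
  | nil => rfl
  | cons b t ih => simp [pv_cols_append, pv_cols_byte, ih]

theorem pv_pyRange4 : PySem.List.pyRange 0 4 1 = [0, 1, 2, 3] := by decide

-- one byte of A's loop prepends exactly the four columns for that byte
theorem pv_inner_eq (b : Int) (st : List Char × List Char) :
    (PySem.List.pyRange 0 4 1).foldl (pvStepA b) st =
      ((pvPairsA b).map Prod.fst ++ st.1, (pvPairsA b).map Prod.snd ++ st.2) := by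
  rw [pv_pyRange4]
  simp only [List.foldl, pvStepA_eq, pvPairsA]
  have h2 : (2 : Int).toNat = 2 := rfl
  have h4 : (4 : Int).toNat = 4 := rfl
  have h6 : (6 : Int).toNat = 6 := rfl
  norm_num [Int.shiftRight_zero, h2, h4, h6]

theorem pv_outer_eq (l : List Int) (st : List Char × List Char) :
    l.foldl (fun st b => (PySem.List.pyRange 0 4 1).foldl (pvStepA b) st) st =
      (((l.reverse.map pvPairsA).flatten).map Prod.fst ++ st.1,
       ((l.reverse.map pvPairsA).flatten).map Prod.snd ++ st.2) := by
  induction l generalizing st with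
  | nil => simp
  | cons b t ih =>
    simp only [List.foldl_cons]
    rw [pv_inner_eq, ih]
    simp [List.flatten_append, List.append_assoc]

-- ===== VERDICT (by name: the statement is the Claim_ definition above) =====
theorem byte_array_wildcard_to_mask_match_strings_spec : Claim_equal_byte_array_wildcard_to_mask_match_strings := by
  intro byte_array _ hpre
  unfold Spec_byte_array_wildcard_to_mask_match_strings
  match byte_array with
  | none => exact absurd rfl hpre
  | some l =>
    unfold byte_array_wildcard_to_mask_match_strings byte_array_wildcard_to_mask_match_strings_alt
    simp only [pv_outer_eq, pv_cols_flatten, List.append_nil]
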